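-- pv_equiv track=rewrite | github.com/LuisDee/architect | scripts/validate_dag.py | check_edge
-- ===== SOURCE A (Python) =====
-- from collections import defaultdict, deque
--
-- def detect_cycles(graph: dict[str, list[str]]) -> list[str] | None:
--     """Kahn's algorithm for cycle detection.
--
--     Returns None if no cycle, or list of nodes involved in the cycle.
--     """
--     # Build in-degree map (edges point from dependent -> dependency,
--     # but for topological sort we need: dependency -> dependent)
--     # graph[A] = [B, C] means A depends on B and C
--     # For Kahn's: in_degree[A] = number of things A depends on
--     in_degree = defaultdict(int)
--     # Reverse adjacency: who depends on me?
--     reverse = defaultdict(list)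
--
--     for node in graph:
--         if node not in in_degree:
--             in_degree[node] = 0
--
--     for node, deps in graph.items():
--         in_degree[node] = len(deps)
--         for dep in deps:
--             reverse[dep].append(node)
--             if dep not in in_degree:
--                 in_degree[dep] = 0
--
--     # Start with nodes that have no dependencies
--     queue = deque(n for n, deg in in_degree.items() if deg == 0)
--     visited = 0
--
--     while queue:
--         node = queue.popleft()
--         visited += 1
--         for dependent in reverse.get(node, []):
--             in_degree[dependent] -= 1
--             if in_degree[dependent] == 0:
--                 queue.append(dependent)
--
--     if visited == len(in_degree):
--         return None  # No cycle
--
--     # Return nodes still with in_degree > 0 (part of cycles)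
--     return [n for n, deg in in_degree.items() if deg > 0]
--
-- def check_edge(graph: dict[str, list[str]], source: str, target: str) -> bool:
--     """Check if adding source -> target (source depends on target) creates a cycle."""
--     temp = {k: list(v) for k, v in graph.items()}
--     if source not in temp:
--         temp[source] = []
--     if target not in temp:
--         temp[target] = []
--     temp[source].append(target)
--     return detect_cycles(temp) is not None
-- ===== SOURCE B (Python) =====
-- def check_edge(graph: dict[str, list[str]], source: str, target: str) -> bool:
--     """Check if adding source -> target (source depends on target) creates a cycle."""
--     temp = {k: list(v) for k, v in graph.items()}
--     if source not in temp:
--         temp[source] = []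
--     if target not in temp:
--         temp[target] = []
--     temp[source].append(target)
--     # Every node mentioned anywhere: keys first, then unseen dependencies.
--     nodes = list(temp)
--     seen = set(nodes)
--     for deps in temp.values():
--         for d in deps:
--             if d not in seen:
--                 nodes.append(d)
--                 seen.add(d)
--     # Fixed-point saturation: repeatedly mark nodes whose dependencies are all
--     # already resolved; a cycle exists iff some node can never be resolved.
--     resolved = set()
--     changed = True
--     while changed:
--         changed = False
--         for n in nodes:
--             if n not in resolved and all(d in resolved for d in temp.get(n, [])):
--                 resolved.add(n)
--                 changed = True
--     return len(resolved) != len(nodes)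
-- ===== Notes on version B (the rewrite author's own statement) =====
-- stated objective: alternative
-- what changed: Replaces Kahn's in-degree/queue/reverse-adjacency topological sort with a fixed-point saturation loop that repeatedly marks nodes whose dependencies are all already resolved; a cycle exists iff saturation cannot resolve every node.
import Mathlib
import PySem

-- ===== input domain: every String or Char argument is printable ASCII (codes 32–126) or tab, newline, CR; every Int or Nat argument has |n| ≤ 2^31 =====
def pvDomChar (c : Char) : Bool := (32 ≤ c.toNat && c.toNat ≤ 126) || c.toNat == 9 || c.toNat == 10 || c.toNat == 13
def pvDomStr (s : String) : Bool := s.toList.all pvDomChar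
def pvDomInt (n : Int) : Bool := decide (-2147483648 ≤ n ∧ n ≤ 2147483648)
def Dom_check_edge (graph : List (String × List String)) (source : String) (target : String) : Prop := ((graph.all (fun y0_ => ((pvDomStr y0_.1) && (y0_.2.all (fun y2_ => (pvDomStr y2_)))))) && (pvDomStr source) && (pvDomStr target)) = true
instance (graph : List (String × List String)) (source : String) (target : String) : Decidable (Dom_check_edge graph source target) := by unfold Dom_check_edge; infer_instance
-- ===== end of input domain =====

-- B replaces A's Kahn's-algorithm cycle detection (in-degree map + reverse adjacency + zero-degree
-- queue) by a fixed-point saturation loop over the node list; same return value, no speed claim.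

-- ===== PORT A =====
-- port of A's detect_cycles: Kahn's algorithm. The while-loop is ported with a fuel counter used
-- purely as a totality guard (the fuel passed in is proved sufficient in the lemmas below).
def pvPhi (d : PySem.Dict String Int) : Nat := (d.values.map Int.toNat).sum

def pvKahnLoop (reverse : PySem.Dict String (List String)) :
    Nat → List String → PySem.Dict String Int → Int → Int × PySem.Dict String Int
  | 0, _, indeg, visited => (visited, indeg)
  | _ + 1, [], indeg, visited => (visited, indeg)
  | fuel + 1, node :: rest, indeg, visited =>
      let st := (reverse.getD node []).foldl
        (fun (st : List String × PySem.Dict String Int) dependent =>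
          let v := st.2.getD dependent 0 - 1
          let d' := st.2.insert dependent v
          if v = 0 then (st.1 ++ [dependent], d') else (st.1, d'))
        (rest, indeg)
      pvKahnLoop reverse fuel st.1 st.2 (visited + 1)

def detect_cycles (graph : PySem.Dict String (List String)) : Option (List String) :=
  let in_degree0 : PySem.Dict String Int :=
    graph.keys.foldl (fun d node => if d.contains node then d else d.insert node 0)
      PySem.Dict.empty
  let built :=
    graph.items.foldl
      (fun (st : PySem.Dict String Int × PySem.Dict String (List String)) nd =>
        nd.2.foldl
          (fun (st : PySem.Dict String Int × PySem.Dict String (List String)) dep =>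
            (if st.1.contains dep then st.1 else st.1.insert dep 0,
             st.2.insert dep (st.2.getD dep [] ++ [nd.1])))
          (st.1.insert nd.1 (nd.2.length : Int), st.2))
      (in_degree0, PySem.Dict.empty)
  let queue := (built.1.items.filter (fun p => p.2 == 0)).map (·.1)
  let res := pvKahnLoop built.2 (queue.length + pvPhi built.1 + 1) queue built.1 0
  if res.1 = (PySem.Dict.size res.2 : Int) then none
  else some ((res.2.items.filter (fun p => decide (0 < p.2))).map (·.1))

def check_edge (graph : List (String × List String)) (source : String) (target : String) : Bool :=
  let temp0 := graph.foldl (fun d kv => d.insert kv.1 kv.2) PySem.Dict.empty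
  let temp1 := if temp0.contains source then temp0 else temp0.insert source ([] : List String)
  let temp2 := if temp1.contains target then temp1 else temp1.insert target ([] : List String)
  let temp := temp2.modify source [] (fun v => v ++ [target])
  (detect_cycles temp).isSome

-- ===== PORT B =====
-- one pass of Source B's inner `for n in nodes` loop; returns (resolved, changed)
def pvSatPass (temp : PySem.Dict String (List String)) (nodes : List String)
    (resolved : PySem.Set String) : PySem.Set String × Bool :=
  nodes.foldl
    (fun acc n =>
      if !PySem.Set.contains acc.1 n && (temp.getD n []).all (fun d => PySem.Set.contains acc.1 d)
      then (PySem.Set.add acc.1 n, true) else acc)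
    (resolved, false)

-- Source B's `while changed` loop; fuel is a totality guard (nodes.length + 1 is proved sufficient)
def pvSatLoop (temp : PySem.Dict String (List String)) (nodes : List String) :
    Nat → List String → List String
  | 0, resolved => resolved
  | fuel + 1, resolved =>
      let p := pvSatPass temp nodes resolved
      if p.2 then pvSatLoop temp nodes fuel p.1 else resolved

def check_edge_alt (graph : List (String × List String)) (source : String) (target : String) :
    Bool :=
  let temp0 := graph.foldl (fun d kv => d.insert kv.1 kv.2) PySem.Dict.empty
  let temp1 := if temp0.contains source then temp0 else temp0.insert source ([] : List String)
  let temp2 := if temp1.contains target then temp1 else temp1.insert target ([] : List String)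
  let temp := temp2.modify source [] (fun v => v ++ [target])
  let nodes0 := temp.keys
  let st := temp.values.foldl
    (fun (st : List String × PySem.Set String) deps =>
      deps.foldl (fun st d =>
        if PySem.Set.contains st.2 d then st else (st.1 ++ [d], PySem.Set.add st.2 d)) st)
    (nodes0, PySem.Set.ofList nodes0)
  let nodes := st.1
  let resolved := pvSatLoop temp nodes (nodes.length + 1) []
  decide (resolved.length ≠ nodes.length)

-- ===== PRECONDITION & SPEC =====
def Spec_check_edge (graph : List (String × List String)) (source : String) (target : String) (out : Bool) : Prop := out = check_edge_alt graph source target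
instance (graph : List (String × List String)) (source : String) (target : String) (out : Bool) : Decidable (Spec_check_edge graph source target out) := by unfold Spec_check_edge; infer_instance

-- ===== CLAIM (what is proved, stated in full; the proofs are below) =====
def Claim_equal_check_edge : Prop := ∀ (graph : List (String × List String)) (source : String) (target : String), Dom_check_edge graph source target → Spec_check_edge graph source target (check_edge graph source target)

-- ===== LEMMAS AND PROOFS =====

-- dependencies of node n in the (shared) temp dict
def pvDeps (temp : PySem.Dict String (List String)) (n : String) : List String := temp.getD n []

-- "S is closed for temp over node universe K"
def pvClosed (temp : PySem.Dict String (List String)) (K : List String)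
    (S : String → Prop) : Prop :=
  ∀ n ∈ K, (∀ d ∈ pvDeps temp n, S d) → S n

-- P lists (without duplicates) the least closed set of nodes of K
def pvLeastClosed (temp : PySem.Dict String (List String)) (K P : List String) : Prop :=
  P.Nodup ∧ (∀ x ∈ P, x ∈ K) ∧ pvClosed temp K (· ∈ P) ∧
    (∀ S : String → Prop, pvClosed temp K S → ∀ x ∈ P, S x)

def pvKahnInv (temp : PySem.Dict String (List String)) (K : List String)
    (Q : List String) (indeg : PySem.Dict String Int) (visited : Int) (P : List String) : Prop :=
  visited = (P.length : Int)
  ∧ (∀ m, indeg.getD m 0 = (((pvDeps temp m).filter (fun d => !P.contains d)).length : Int))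
  ∧ (∀ n, n ∈ Q ↔ n ∈ K ∧ n ∉ P ∧ ∀ d ∈ pvDeps temp n, d ∈ P)
  ∧ Q.Nodup ∧ P.Nodup ∧ (∀ x ∈ P, x ∈ K)
  ∧ (∀ m ∈ P, ∀ d ∈ pvDeps temp m, d ∈ P)
  ∧ (∀ S : String → Prop, pvClosed temp K S → ∀ x ∈ P, S x)
  ∧ indeg.keys = K

theorem pvLeastClosed_length_eq (temp : PySem.Dict String (List String)) (K K' P R : List String)
    (hK : ∀ n, n ∈ K ↔ n ∈ K')
    (hP : pvLeastClosed temp K P) (hR : pvLeastClosed temp K' R) : P.length = R.length := by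
  obtain ⟨hPn, hPK, hPc, hPl⟩ := hP
  obtain ⟨hRn, hRK, hRc, hRl⟩ := hR
  have h1 : ∀ x ∈ P, x ∈ R := by
    apply hPl
    intro n hn hd
    exact hRc n ((hK n).1 hn) hd
  have h2 : ∀ x ∈ R, x ∈ P := by
    apply hRl
    intro n hn hd
    exact hPc n ((hK n).2 hn) hd
  exact List.Perm.length_eq ((List.perm_ext_iff_of_nodup hPn hRn).2 (fun a => ⟨h1 a, h2 a⟩))

theorem pv_zero_fold (l : List String) (d : PySem.Dict String Int) :
    (∀ n, (l.foldl (fun d node => if d.contains node then d else d.insert node 0) d).getD n 0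
        = d.getD n 0)
    ∧ (∀ n, n ∈ (l.foldl (fun d node => if d.contains node then d else d.insert node 0) d).keys
        ↔ n ∈ d.keys ∨ n ∈ l)
    ∧ (d.keys.Nodup →
        (l.foldl (fun d node => if d.contains node then d else d.insert node 0) d).keys.Nodup) := by
  induction l generalizing d with
  | nil => simp
  | cons x l ih =>
    simp only [List.foldl_cons]
    by_cases hc : d.contains x
    · simp only [hc, if_pos]
      obtain ⟨i1, i2, i3⟩ := ih d
      refine ⟨i1, fun n => ?_, i3⟩
      rw [i2]
      have hx : x ∈ d.keys := (PySem.Dict.contains_iff_mem_keys d x).1 hc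
      simp only [List.mem_cons]
      constructor
      · rintro (h | h) <;> tauto
      · rintro (h | rfl | h) <;> tauto
    · simp only [hc, if_neg, Bool.false_eq_true, not_false_iff]
      obtain ⟨i1, i2, i3⟩ := ih (d.insert x 0)
      have hx : ¬ x ∈ d.keys := fun h => hc ((PySem.Dict.contains_iff_mem_keys d x).2 h)
      refine ⟨fun n => ?_, fun n => ?_, fun hnd => ?_⟩
      · rw [i1, PySem.Dict.getD_insert]
        split
        · next h => subst h; rw [PySem.Dict.getD_of_not_contains d 0 (by simpa using hc)]
        · rfl
      · rw [i2]
        simp only [PySem.Dict.mem_keys_insert, List.mem_cons]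
        tauto
      · apply i3
        rw [PySem.Dict.keys_insert_of_not_contains d 0 (by simpa using hc)]
        exact hnd.append (List.nodup_singleton x) (List.disjoint_singleton.2 hx)

theorem pv_build_inner (k : String) (dv : List String)
    (ind : PySem.Dict String Int) (rev : PySem.Dict String (List String)) :
    (∀ m, (dv.foldl (fun st dep =>
            (if st.1.contains dep then st.1 else st.1.insert dep 0,
             st.2.insert dep (st.2.getD dep [] ++ [k]))) (ind, rev)).1.getD m 0 = ind.getD m 0)
    ∧ (∀ m, m ∈ (dv.foldl (fun st dep =>
            (if st.1.contains dep then st.1 else st.1.insert dep 0,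
             st.2.insert dep (st.2.getD dep [] ++ [k]))) (ind, rev)).1.keys
          ↔ m ∈ ind.keys ∨ m ∈ dv)
    ∧ (ind.keys.Nodup → (dv.foldl (fun st dep =>
            (if st.1.contains dep then st.1 else st.1.insert dep 0,
             st.2.insert dep (st.2.getD dep [] ++ [k]))) (ind, rev)).1.keys.Nodup)
    ∧ (∀ x, (dv.foldl (fun st dep =>
            (if st.1.contains dep then st.1 else st.1.insert dep 0,
             st.2.insert dep (st.2.getD dep [] ++ [k]))) (ind, rev)).2.getD x []
          = rev.getD x [] ++ List.replicate (dv.count x) k) := by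
  induction dv generalizing ind rev with
  | nil => simp
  | cons dep dv ih =>
    simp only [List.foldl_cons]
    obtain ⟨i1, i2, i3, i4⟩ := ih (if ind.contains dep then ind else ind.insert dep 0)
      (rev.insert dep (rev.getD dep [] ++ [k]))
    refine ⟨fun m => ?_, fun m => ?_, fun hnd => ?_, fun x => ?_⟩
    · rw [i1]
      by_cases hc : ind.contains dep
      · simp [hc]
      · simp only [hc, Bool.false_eq_true, if_neg, not_false_iff, if_false]
        rw [PySem.Dict.getD_insert]
        split
        · next h => subst h; rw [PySem.Dict.getD_of_not_contains ind 0 (by simpa using hc)]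
        · rfl
    · rw [i2]
      by_cases hc : ind.contains dep
      · have hd : dep ∈ ind.keys := (PySem.Dict.contains_iff_mem_keys ind dep).1 hc
        simp only [hc, if_pos, List.mem_cons]
        constructor
        · rintro (h | h) <;> tauto
        · rintro (h | rfl | h) <;> tauto
      · simp only [hc, Bool.false_eq_true, if_neg, not_false_iff, if_false,
          PySem.Dict.mem_keys_insert, List.mem_cons]
        tauto
    · apply i3
      by_cases hc : ind.contains dep
      · simpa [hc] using hnd
      · simp only [hc, Bool.false_eq_true, if_neg, not_false_iff, if_false]
        rw [PySem.Dict.keys_insert_of_not_contains ind 0 (by simpa using hc)]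
        exact hnd.append (List.nodup_singleton dep)
          (List.disjoint_singleton.2 (fun h => (by simpa using hc : ¬ _) ((PySem.Dict.contains_iff_mem_keys ind dep).2 h)))
    · rw [i4, PySem.Dict.getD_insert]
      split
      · next h =>
        subst h
        simp [List.count_cons_self, List.replicate_succ, List.append_assoc]
      · next h =>
        simp [List.count_cons, Ne.symm h]

theorem pv_build_fold (its : List (String × List String))
    (ind : PySem.Dict String Int) (rev : PySem.Dict String (List String)) :
    (∀ n v, (n, v) ∈ its → (its.map Prod.fst).Nodup →
        (its.foldl (fun st nd => nd.2.foldl (fun st dep =>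
            (if st.1.contains dep then st.1 else st.1.insert dep 0,
             st.2.insert dep (st.2.getD dep [] ++ [nd.1])))
            (st.1.insert nd.1 (nd.2.length : Int), st.2)) (ind, rev)).1.getD n 0
          = (v.length : Int))
    ∧ (∀ n, n ∉ its.map Prod.fst →
        (its.foldl (fun st nd => nd.2.foldl (fun st dep =>
            (if st.1.contains dep then st.1 else st.1.insert dep 0,
             st.2.insert dep (st.2.getD dep [] ++ [nd.1])))
            (st.1.insert nd.1 (nd.2.length : Int), st.2)) (ind, rev)).1.getD n 0
          = ind.getD n 0)
    ∧ (∀ n, n ∈ (its.foldl (fun st nd => nd.2.foldl (fun st dep =>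
            (if st.1.contains dep then st.1 else st.1.insert dep 0,
             st.2.insert dep (st.2.getD dep [] ++ [nd.1])))
            (st.1.insert nd.1 (nd.2.length : Int), st.2)) (ind, rev)).1.keys
          ↔ n ∈ ind.keys ∨ n ∈ its.map Prod.fst ∨ ∃ p ∈ its, n ∈ p.2)
    ∧ (ind.keys.Nodup →
        (its.foldl (fun st nd => nd.2.foldl (fun st dep =>
            (if st.1.contains dep then st.1 else st.1.insert dep 0,
             st.2.insert dep (st.2.getD dep [] ++ [nd.1])))
            (st.1.insert nd.1 (nd.2.length : Int), st.2)) (ind, rev)).1.keys.Nodup)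
    ∧ (∀ x, (its.foldl (fun st nd => nd.2.foldl (fun st dep =>
            (if st.1.contains dep then st.1 else st.1.insert dep 0,
             st.2.insert dep (st.2.getD dep [] ++ [nd.1])))
            (st.1.insert nd.1 (nd.2.length : Int), st.2)) (ind, rev)).2.getD x []
          = rev.getD x [] ++ (its.map (fun p => List.replicate (p.2.count x) p.1)).flatten) := by
  induction its generalizing ind rev with
  | nil => simp
  | cons hd tl ih =>
    simp only [List.foldl_cons]
    obtain ⟨j1, j2, j3, j4⟩ := pv_build_inner hd.1 hd.2 (ind.insert hd.1 (hd.2.length : Int)) rev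
    set st1 : PySem.Dict String Int × PySem.Dict String (List String) :=
      hd.2.foldl (fun st dep =>
            (if st.1.contains dep then st.1 else st.1.insert dep 0,
             st.2.insert dep (st.2.getD dep [] ++ [hd.1]))) (ind.insert hd.1 (hd.2.length : Int), rev) with hst1
    obtain ⟨i1, i2, i3, i4, i5⟩ := ih st1.1 st1.2
    simp only [Prod.mk.eta] at i1 i2 i3 i4 i5
    refine ⟨fun n v hnv hnd => ?_, fun n hn => ?_, fun n => ?_, fun hnd => ?_, fun x => ?_⟩
    · rcases List.mem_cons.1 hnv with h | h
      · have hne : n ∉ tl.map Prod.fst := by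
          have := hnd
          simp only [List.map_cons, List.nodup_cons] at this
          have : hd.1 ∉ tl.map Prod.fst := this.1
          have hn1 : n = hd.1 := by rw [← h]
          rw [hn1]; exact this
        rw [i2 n hne, j1 n]
        have hn1 : n = hd.1 := by rw [← h]
        have hv : v = hd.2 := by rw [← h]
        rw [hn1, hv, PySem.Dict.getD_insert]
        simp
      · exact i1 n v h (by simpa using (List.nodup_cons.1 (by simpa using hnd)).2)
    · have hn2 : n ∉ tl.map Prod.fst := fun h => hn (by simp [h])
      have hn1 : n ≠ hd.1 := fun h => hn (by simp [h])
      rw [i2 n hn2, j1 n, PySem.Dict.getD_insert]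
      simp [hn1]
    · rw [i3]
      have hj2 := j2 n
      rw [PySem.Dict.mem_keys_insert] at hj2
      simp only [hj2, List.map_cons, List.mem_cons]
      constructor
      · rintro (((h | h) | h) | h | ⟨p, hp, hnp⟩)
        · tauto
        · tauto
        · exact Or.inr (Or.inr ⟨hd, by simp, h⟩)
        · tauto
        · exact Or.inr (Or.inr ⟨p, by simp [hp], hnp⟩)
      · rintro (h | (h | h) | ⟨p, hp, hnp⟩)
        · tauto
        · tauto
        · tauto
        · rcases hp with rfl | hp
          · tauto
          · exact Or.inr (Or.inr ⟨p, hp, hnp⟩)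
    · exact i4 (j3 (PySem.Dict.nodup_keys_insert ind hd.1 _ hnd))
    · rw [i5, j4]
      simp [List.append_assoc]

theorem pv_dec_fold (L : List String) : ∀ (q : List String) (d : PySem.Dict String Int),
    ∃ A : List String,
      (L.foldl (fun st dependent =>
          let v := st.2.getD dependent 0 - 1
          let d' := st.2.insert dependent v
          if v = 0 then (st.1 ++ [dependent], d') else (st.1, d')) (q, d)).1 = q ++ A
      ∧ A.Nodup
      ∧ (∀ m, m ∈ A ↔ 1 ≤ d.getD m 0 ∧ d.getD m 0 ≤ (L.count m : Int))
      ∧ (∀ m, (L.foldl (fun st dependent =>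
          let v := st.2.getD dependent 0 - 1
          let d' := st.2.insert dependent v
          if v = 0 then (st.1 ++ [dependent], d') else (st.1, d')) (q, d)).2.getD m 0
            = d.getD m 0 - L.count m)
      ∧ ((∀ x ∈ L, x ∈ d.keys) → (L.foldl (fun st dependent =>
          let v := st.2.getD dependent 0 - 1
          let d' := st.2.insert dependent v
          if v = 0 then (st.1 ++ [dependent], d') else (st.1, d')) (q, d)).2.keys = d.keys) := by
  induction L with
  | nil =>
    intro q d
    refine ⟨[], by simp, List.nodup_nil, fun m => ?_, fun m => by simp, fun _ => rfl⟩
    simp only [List.foldl_nil, List.not_mem_nil, false_iff, List.count_nil]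
    push_cast
    omega
  | cons x L ih =>
    intro q d
    simp only [List.foldl_cons]
    by_cases hv : d.getD x 0 - 1 = 0
    · simp only [hv, if_pos]
      obtain ⟨A', h1, h2, h3, h4, h5⟩ := ih (q ++ [x]) (d.insert x 0)
      have hgx : (d.insert x 0).getD x 0 = 0 := by rw [PySem.Dict.getD_insert]; simp
      have hgne : ∀ m, m ≠ x → (d.insert x 0).getD m 0 = d.getD m 0 := by
        intro m hm; rw [PySem.Dict.getD_insert, if_neg hm]
      have hxA : x ∉ A' := by
        intro hx
        have := (h3 x).1 hx
        rw [hgx] at this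
        omega
      refine ⟨x :: A', by simpa [List.append_assoc] using h1, List.nodup_cons.2 ⟨hxA, h2⟩,
        fun m => ?_, fun m => ?_, fun hk => ?_⟩
      · by_cases hmx : m = x
        · subst hmx
          simp only [List.mem_cons, true_or, true_iff]
          rw [List.count_cons_self]
          push_cast
          omega
        · have := h3 m
          rw [hgne m hmx] at this
          simp only [List.mem_cons, hmx, false_or, this, List.count_cons, beq_iff_eq, if_false, add_zero, Ne.symm hmx, if_neg (Ne.symm hmx)]
      · have := h4 m
        by_cases hmx : m = x
        · subst hmx
          rw [hgx] at this
          rw [this, List.count_cons_self]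
          push_cast
          omega
        · rw [hgne m hmx] at this
          rw [this]
          simp [List.count_cons, Ne.symm hmx]
      · have hxk : x ∈ d.keys := hk x (by simp)
        have hkeq : (d.insert x 0).keys = d.keys :=
          PySem.Dict.keys_insert_of_contains d _ ((PySem.Dict.contains_iff_mem_keys d x).2 hxk)
        rw [h5 (by rw [hkeq]; exact fun y hy => hk y (by simp [hy])), hkeq]
    · simp only [hv, if_neg, Bool.false_eq_true, not_false_iff]
      obtain ⟨A', h1, h2, h3, h4, h5⟩ := ih q (d.insert x (d.getD x 0 - 1))
      have hgx : (d.insert x (d.getD x 0 - 1)).getD x 0 = d.getD x 0 - 1 := by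
        rw [PySem.Dict.getD_insert]; simp
      have hgne : ∀ m, m ≠ x → (d.insert x (d.getD x 0 - 1)).getD m 0 = d.getD m 0 := by
        intro m hm; rw [PySem.Dict.getD_insert, if_neg hm]
      refine ⟨A', h1, h2, fun m => ?_, fun m => ?_, fun hk => ?_⟩
      · have := h3 m
        by_cases hmx : m = x
        · subst hmx
          rw [hgx] at this
          rw [this, List.count_cons_self]
          constructor <;> (intro h; push_cast at h ⊢; omega)
        · rw [hgne m hmx] at this
          rw [this]
          simp [List.count_cons, Ne.symm hmx]
      · have := h4 m
        by_cases hmx : m = x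
        · subst hmx
          rw [hgx] at this
          rw [this, List.count_cons_self]
          push_cast
          ring
        · rw [hgne m hmx] at this
          rw [this]
          simp [List.count_cons, Ne.symm hmx]
      · have hxk : x ∈ d.keys := hk x (by simp)
        have hkeq : (d.insert x (d.getD x 0 - 1)).keys = d.keys :=
          PySem.Dict.keys_insert_of_contains d _ ((PySem.Dict.contains_iff_mem_keys d x).2 hxk)
        rw [h5 (by rw [hkeq]; exact fun y hy => hk y (by simp [hy])), hkeq]

theorem pv_sum_sub (K : List String) (f g : String → Nat) (h : ∀ m ∈ K, g m ≤ f m) :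
    (K.map (fun m => f m - g m)).sum + (K.map g).sum = (K.map f).sum := by
  induction K with
  | nil => simp
  | cons a K ih =>
    simp only [List.map_cons, List.sum_cons]
    have ha := h a (by simp)
    have := ih (fun m hm => h m (by simp [hm]))
    omega

theorem pv_len_le_sum (A : List String) (g : String → Nat) (h : ∀ m ∈ A, 1 ≤ g m) :
    A.length ≤ (A.map g).sum := by
  induction A with
  | nil => simp
  | cons a A ih =>
    simp only [List.map_cons, List.sum_cons, List.length_cons]
    have := ih (fun m hm => h m (by simp [hm]))
    have := h a (by simp)
    omega

theorem pv_subperm_sum (A K : List String) (g : String → Nat) (hnd : A.Nodup)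
    (hsub : ∀ x ∈ A, x ∈ K) : (A.map g).sum ≤ (K.map g).sum := by
  obtain ⟨A', hperm, hsl⟩ := (hnd.subperm hsub)
  calc (A.map g).sum = (A'.map g).sum := ((hperm.map g).sum_eq).symm
    _ ≤ (K.map g).sum := (hsl.map g).sum_le_sum (fun a _ => Nat.zero_le a)

theorem pv_filter_sub_length (l P : List String) (node : String) (h : node ∉ P) :
    (l.filter (fun d => !(P ++ [node]).contains d)).length + l.count node
      = (l.filter (fun d => !P.contains d)).length := by
  induction l with
  | nil => simp
  | cons d l ih =>
    simp only [List.filter_cons, List.count_cons]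
    by_cases hd : d = node
    · subst hd
      have h1 : (!(P ++ [d]).contains d) = false := by simp
      have h2 : (!P.contains d) = true := by simpa using h
      rw [h1, h2]
      simp only [Bool.false_eq_true, if_neg, not_false_iff, if_pos, List.length_cons]
      have h3 := ih
      simp only [beq_self_eq_true, if_pos]
      omega
    · have hcc : ((P ++ [node]).contains d) = (P.contains d) := by
        simp [List.contains_eq_mem, hd]
      rw [hcc]
      have h3 := ih
      by_cases hc : (!P.contains d) = true
      · rw [if_pos hc, if_pos hc]
        simp only [List.length_cons, beq_iff_eq, hd, if_false]
        omega
      · rw [if_neg hc, if_neg hc]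
        simp only [beq_iff_eq, hd, if_false]
        omega

theorem pv_flat_count (its : List (String × List String)) (x m : String) :
    ((its.map (fun p => List.replicate (p.2.count x) p.1)).flatten).count m
      = ((its.filter (fun p => p.1 = m)).map (fun p => p.2.count x)).sum := by
  induction its with
  | nil => simp
  | cons hd tl ih =>
    simp only [List.map_cons, List.flatten_cons, List.count_append, List.filter_cons]
    by_cases h : hd.1 = m
    · rw [if_pos (by simpa using h)]
      simp only [List.map_cons, List.sum_cons, ih]
      rw [h, List.count_replicate_self]
    · rw [if_neg (by simpa using h)]
      rw [ih, List.count_replicate]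
      simp [h]

theorem pv_assoc_filter (its : List (String × List String)) (m : String)
    (hnd : (its.map Prod.fst).Nodup) :
    (∀ v, (m, v) ∈ its → its.filter (fun p => p.1 = m) = [(m, v)])
    ∧ (m ∉ its.map Prod.fst → its.filter (fun p => p.1 = m) = []) := by
  induction its with
  | nil => simp
  | cons hd tl ih =>
    simp only [List.map_cons, List.nodup_cons] at hnd
    obtain ⟨hh, ht⟩ := hnd
    obtain ⟨j1, j2⟩ := ih ht
    constructor
    · intro v hv
      rcases List.mem_cons.1 hv with rfl | hv
      · rw [List.filter_cons, if_pos (by simp), j2 (by simpa using hh)]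
      · have hne : hd.1 ≠ m := fun he => hh (by rw [he]; exact List.mem_map.2 ⟨(m, v), hv, rfl⟩)
        rw [List.filter_cons, if_neg (by simp [hne])]
        exact j1 v hv
    · intro hm
      simp only [List.map_cons, List.mem_cons] at hm
      push_neg at hm
      rw [List.filter_cons, if_neg (by simp [Ne.symm hm.1])]
      exact j2 hm.2

theorem pv_pass_true (temp : PySem.Dict String (List String)) (ns : List String) :
    ∀ (acc : List String × Bool), acc.2 = true →
      (ns.foldl (fun acc n =>
          if !PySem.Set.contains acc.1 n && (temp.getD n []).all (fun d => PySem.Set.contains acc.1 d)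
          then (PySem.Set.add acc.1 n, true) else acc) acc).2 = true := by
  induction ns with
  | nil => intro acc h; exact h
  | cons n ns ih =>
    intro acc h
    simp only [List.foldl_cons]
    split
    · exact ih _ rfl
    · exact ih _ h

theorem pv_pass_fold (temp : PySem.Dict String (List String)) (ns : List String) :
    ∀ (acc : List String × Bool), acc.1.Nodup →
      ∃ add : List String,
        (ns.foldl (fun acc n =>
            if !PySem.Set.contains acc.1 n && (temp.getD n []).all (fun d => PySem.Set.contains acc.1 d)
            then (PySem.Set.add acc.1 n, true) else acc) acc).1 = acc.1 ++ add
        ∧ (acc.1 ++ add).Nodup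
        ∧ (∀ x ∈ add, x ∈ ns ∧ x ∉ acc.1)
        ∧ ((ns.foldl (fun acc n =>
            if !PySem.Set.contains acc.1 n && (temp.getD n []).all (fun d => PySem.Set.contains acc.1 d)
            then (PySem.Set.add acc.1 n, true) else acc) acc).2 = false →
              add = [] ∧ acc.2 = false
              ∧ ∀ n ∈ ns, n ∈ acc.1 ∨ ∃ d ∈ pvDeps temp n, d ∉ acc.1)
        ∧ ((ns.foldl (fun acc n =>
            if !PySem.Set.contains acc.1 n && (temp.getD n []).all (fun d => PySem.Set.contains acc.1 d)
            then (PySem.Set.add acc.1 n, true) else acc) acc).2 = true → acc.2 = false → add ≠ [])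
        ∧ (∀ S : String → Prop,
            (∀ n ∈ ns, (∀ d ∈ pvDeps temp n, S d) → S n) →
            (∀ x ∈ acc.1, S x) → ∀ x ∈ add, S x) := by
  induction ns with
  | nil =>
    intro acc hnd
    exact ⟨[], by simp, by simpa using hnd, by simp, fun h => ⟨rfl, h, by simp⟩, by simp,
      by simp⟩
  | cons n ns ih =>
    intro acc hnd
    simp only [List.foldl_cons]
    by_cases hc : (!PySem.Set.contains acc.1 n
        && (temp.getD n []).all (fun d => PySem.Set.contains acc.1 d)) = true
    · rw [if_pos hc]
      simp only [Bool.and_eq_true, Bool.not_eq_true', List.all_eq_true] at hc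
      have hnmem : n ∉ acc.1 := by
        intro h
        rw [(PySem.Set.contains_iff acc.1 n).2 h] at hc
        exact absurd hc.1 (by simp)
      have hdeps : ∀ d ∈ pvDeps temp n, d ∈ acc.1 := by
        intro d hd
        exact (PySem.Set.contains_iff acc.1 d).1 (hc.2 d hd)
      rw [PySem.Set.add_of_not_mem hnmem]
      have hnd' : (acc.1 ++ [n]).Nodup :=
        hnd.append (List.nodup_singleton n) (List.disjoint_singleton.2 hnmem)
      obtain ⟨add', g1, g2, g3, g4, g5, g6⟩ := ih (acc.1 ++ [n], true) hnd'
      have htrue : (ns.foldl (fun acc n =>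
          if !PySem.Set.contains acc.1 n && (temp.getD n []).all (fun d => PySem.Set.contains acc.1 d)
          then (PySem.Set.add acc.1 n, true) else acc) (acc.1 ++ [n], true)).2 = true :=
        pv_pass_true temp ns _ rfl
      refine ⟨n :: add', by simpa [List.append_assoc] using g1,
        by simpa [List.append_assoc] using g2, ?_, ?_, fun _ _ => by simp, ?_⟩
      · intro x hx
        rcases List.mem_cons.1 hx with rfl | hx
        · exact ⟨by simp, hnmem⟩
        · obtain ⟨hx1, hx2⟩ := g3 x hx
          exact ⟨by simp [hx1], fun h => hx2 (by simp [h])⟩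
      · intro h
        rw [htrue] at h
        exact absurd h (by simp)
      · intro S hS hbase x hx
        have hSn : S n := hS n (by simp) (fun d hd => hbase d (hdeps d hd))
        rcases List.mem_cons.1 hx with rfl | hx
        · exact hSn
        · refine g6 S (fun m hm hd => hS m (by simp [hm]) hd) ?_ x hx
          intro y hy
          rcases List.mem_append.1 hy with h | h
          · exact hbase y h
          · rw [List.mem_singleton.1 h]; exact hSn
    · rw [if_neg hc]
      obtain ⟨add', g1, g2, g3, g4, g5, g6⟩ := ih acc hnd
      refine ⟨add', g1, g2, fun x hx => ⟨by simp [(g3 x hx).1], (g3 x hx).2⟩, ?_, g5,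
        fun S hS hbase => g6 S (fun m hm hd => hS m (by simp [hm]) hd) hbase⟩
      intro h
      obtain ⟨e1, e2, e3⟩ := g4 h
      refine ⟨e1, e2, ?_⟩
      intro m hm
      rcases List.mem_cons.1 hm with rfl | hm
      · simp only [Bool.and_eq_true, Bool.not_eq_true', List.all_eq_true, not_and] at hc
        by_cases hmem : m ∈ acc.1
        · exact Or.inl hmem
        · right
          have := hc (by
            rw [Bool.eq_false_iff]
            intro h
            exact hmem ((PySem.Set.contains_iff acc.1 m).1 h))
          push_neg at this
          obtain ⟨d, hd, hdc⟩ := this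
          exact ⟨d, hd, fun hmem' => hdc ((PySem.Set.contains_iff acc.1 d).2 hmem')⟩
      · exact e3 m hm

theorem pv_pass_spec (temp : PySem.Dict String (List String)) (ns res : List String)
    (hnd : res.Nodup) :
    ∃ add : List String,
      (pvSatPass temp ns res).1 = res ++ add
      ∧ (res ++ add).Nodup
      ∧ (∀ x ∈ add, x ∈ ns ∧ x ∉ res)
      ∧ ((pvSatPass temp ns res).2 = false →
          add = [] ∧ ∀ n ∈ ns, n ∈ res ∨ ∃ d ∈ pvDeps temp n, d ∉ res)
      ∧ ((pvSatPass temp ns res).2 = true → add ≠ [])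
      ∧ (∀ S : String → Prop,
          (∀ n ∈ ns, (∀ d ∈ pvDeps temp n, S d) → S n) →
          (∀ x ∈ res, S x) → ∀ x ∈ add, S x) := by
  obtain ⟨add, g1, g2, g3, g4, g5, g6⟩ := pv_pass_fold temp ns (res, false) hnd
  exact ⟨add, g1, g2, g3, fun h => ⟨(g4 h).1, (g4 h).2.2⟩, fun h => g5 h rfl, g6⟩

theorem pv_filter_lt (l : List String) (p q : String → Bool)
    (h : ∀ a ∈ l, p a = true → q a = true) (x : String) (hx : x ∈ l) (hqx : q x = true)
    (hpx : p x = false) : (l.filter p).length < (l.filter q).length := by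
  induction l with
  | nil => cases hx
  | cons a l ih =>
    have hmono : (l.filter p).length ≤ (l.filter q).length := by
      rw [← List.countP_eq_length_filter, ← List.countP_eq_length_filter]
      exact List.countP_mono_left (fun a ha => h a (by simp [ha]))
    rcases List.mem_cons.1 hx with rfl | hx'
    · simp only [List.filter_cons, hqx, hpx]
      simp only [if_pos, Bool.false_eq_true, if_neg, not_false_iff, List.length_cons]
      omega
    · have hstep := ih (fun a ha hp => h a (by simp [ha]) hp) hx'
      simp only [List.filter_cons]
      by_cases hpa : p a = true
      · rw [if_pos hpa, if_pos (h a (by simp) hpa)]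
        simpa using hstep
      · rw [if_neg (by simpa using hpa)]
        split
        · simp only [List.length_cons]; omega
        · exact hstep

theorem pv_sat_main (temp : PySem.Dict String (List String)) (ns : List String) :
    ∀ (fuel : Nat) (res : List String), res.Nodup → (∀ x ∈ res, x ∈ ns) →
      (ns.filter (fun x => !res.contains x)).length < fuel →
      (pvSatLoop temp ns fuel res).Nodup
      ∧ (∀ x ∈ pvSatLoop temp ns fuel res, x ∈ ns)
      ∧ (∀ x ∈ res, x ∈ pvSatLoop temp ns fuel res)
      ∧ pvClosed temp ns (· ∈ pvSatLoop temp ns fuel res)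
      ∧ (∀ S : String → Prop, pvClosed temp ns S → (∀ x ∈ res, S x) →
          ∀ x ∈ pvSatLoop temp ns fuel res, S x) := by
  intro fuel
  induction fuel with
  | zero => intro res _ _ h; omega
  | succ fuel ih =>
    intro res hnd hsub hbound
    obtain ⟨add, g1, g2, g3, g4, g5, g6⟩ := pv_pass_spec temp ns res hnd
    simp only [pvSatLoop]
    by_cases hch : (pvSatPass temp ns res).2 = true
    · rw [if_pos hch, g1]
      have hadd : add ≠ [] := g5 hch
      have hsub' : ∀ x ∈ res ++ add, x ∈ ns := by
        intro x hxm
        rcases List.mem_append.1 hxm with hh | hh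
        · exact hsub x hh
        · exact (g3 x hh).1
      obtain ⟨x0, hx0⟩ := List.exists_mem_of_ne_nil add hadd
      have hdec : (ns.filter (fun x => !(res ++ add).contains x)).length
          < (ns.filter (fun x => !res.contains x)).length := by
        apply pv_filter_lt
        · intro a _ hpa
          simp only [Bool.not_eq_true', List.contains_eq_mem, decide_eq_false_iff_not] at hpa ⊢
          intro hm
          exact hpa (List.mem_append.2 (Or.inl hm))
        · exact (g3 x0 hx0).1
        · simp only [Bool.not_eq_true', List.contains_eq_mem, decide_eq_false_iff_not]
          simpa using (g3 x0 hx0).2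
        · simp only [Bool.not_eq_true', List.contains_eq_mem]
          simp [List.mem_append.2 (Or.inr hx0)]
      obtain ⟨i1, i2, i3, i4, i5⟩ := ih (res ++ add) g2 hsub' (by omega)
      refine ⟨i1, i2, fun x hxm => i3 x (List.mem_append.2 (Or.inl hxm)), i4, ?_⟩
      intro S hS hbase
      apply i5 S hS
      intro x hxm
      rcases List.mem_append.1 hxm with hh | hh
      · exact hbase x hh
      · exact g6 S hS hbase x hh
    · rw [if_neg hch]
      obtain ⟨e1, e3⟩ := g4 (by simpa using hch)
      refine ⟨hnd, hsub, fun x hx => hx, ?_, fun S hS hbase x hx => hbase x hx⟩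
      intro n hn hd
      rcases e3 n hn with hh | ⟨d, hdm, hdn⟩
      · exact hh
      · exact absurd (hd d hdm) hdn

theorem pv_nodes_fold (vals : List (List String)) : ∀ (init : List String),
    (∀ n, n ∈ vals.foldl
        (fun ns deps => deps.foldl (fun ns d => if ns.contains d then ns else ns ++ [d]) ns) init
      ↔ n ∈ init ∨ ∃ v ∈ vals, n ∈ v)
    ∧ (init.Nodup → (vals.foldl
        (fun ns deps => deps.foldl (fun ns d => if ns.contains d then ns else ns ++ [d]) ns)
        init).Nodup) := by
  have inner : ∀ (deps init : List String),
      (∀ n, n ∈ deps.foldl (fun ns d => if ns.contains d then ns else ns ++ [d]) init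
        ↔ n ∈ init ∨ n ∈ deps)
      ∧ (init.Nodup →
        (deps.foldl (fun ns d => if ns.contains d then ns else ns ++ [d]) init).Nodup) := by
    intro deps
    induction deps with
    | nil => intro init; simp
    | cons d deps ih =>
      intro init
      simp only [List.foldl_cons]
      by_cases hc : init.contains d
      · rw [if_pos hc]
        obtain ⟨j1, j2⟩ := ih init
        refine ⟨fun n => ?_, j2⟩
        rw [j1]
        have : d ∈ init := List.contains_iff_mem.1 hc
        simp only [List.mem_cons]
        constructor
        · rintro (h | h) <;> tauto
        · rintro (h | rfl | h) <;> tauto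
      · rw [if_neg hc]
        obtain ⟨j1, j2⟩ := ih (init ++ [d])
        refine ⟨fun n => ?_, fun hnd => ?_⟩
        · rw [j1]
          simp only [List.mem_append, List.mem_singleton, List.mem_cons]
          tauto
        · exact j2 (hnd.append (List.nodup_singleton d)
            (List.disjoint_singleton.2 (fun h => (by simpa using hc : d ∉ init) h)))
  intro init0
  induction vals generalizing init0 with
  | nil => simp
  | cons v vals ih =>
    simp only [List.foldl_cons]
    obtain ⟨j1, j2⟩ := inner v init0
    obtain ⟨i1, i2⟩ := ih (v.foldl (fun ns d => if ns.contains d then ns else ns ++ [d]) init0)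
    refine ⟨fun n => ?_, fun hnd => i2 (j2 hnd)⟩
    rw [i1, j1]
    constructor
    · rintro ((h | h) | ⟨w, hw, hnw⟩)
      · tauto
      · exact Or.inr ⟨v, by simp, h⟩
      · exact Or.inr ⟨w, by simp [hw], hnw⟩
    · rintro (h | ⟨w, hw, hnw⟩)
      · tauto
      · rcases List.mem_cons.1 hw with rfl | hw
        · tauto
        · exact Or.inr ⟨w, hw, hnw⟩

theorem pv_kahn_main (temp : PySem.Dict String (List String)) (K : List String)
    (rev : PySem.Dict String (List String))
    (hK : K.Nodup)
    (hrevc : ∀ x m, (rev.getD x []).count m = (pvDeps temp m).count x)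
    (hdepK : ∀ n, pvDeps temp n ≠ [] → n ∈ K) :
    ∀ (fuel : Nat) (Q : List String) (indeg : PySem.Dict String Int) (visited : Int)
      (P : List String),
      pvKahnInv temp K Q indeg visited P →
      Q.length + pvPhi indeg < fuel →
      ∃ P' : List String,
        (pvKahnLoop rev fuel Q indeg visited).1 = (P'.length : Int)
        ∧ (pvKahnLoop rev fuel Q indeg visited).2.keys = K
        ∧ pvLeastClosed temp K P' := by
  intro fuel
  induction fuel with
  | zero => intro Q indeg visited P hInv hb; omega
  | succ fuel ih =>
    intro Q indeg visited P hInv hb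
    obtain ⟨i1, i2, i3, i4, i5, i6, i7, i8, i9⟩ := hInv
    cases Q with
    | nil =>
      refine ⟨P, i1, i9, i5, i6, ?_, i8⟩
      intro n hn hd
      by_contra hnp
      exact absurd ((i3 n).2 ⟨hn, hnp, hd⟩) (List.not_mem_nil)
    | cons node rest =>
      obtain ⟨hnK, hnP, hndep⟩ := (i3 node).1 (List.mem_cons_self)
      obtain ⟨A, d1, d2, d3, d4, d5⟩ := pv_dec_fold (rev.getD node []) rest indeg
      -- abbreviations
      set P' := P ++ [node] with hP'
      have hmemP' : ∀ m, m ∈ P' ↔ m ∈ P ∨ m = node := by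
        intro m; simp [hP']
      have hfsub : ∀ m, ((pvDeps temp m).filter (fun d => !P'.contains d)).length
          + (pvDeps temp m).count node
          = ((pvDeps temp m).filter (fun d => !P.contains d)).length :=
        fun m => pv_filter_sub_length (pvDeps temp m) P node hnP
      have hcount : ∀ m, (rev.getD node []).count m = (pvDeps temp m).count node :=
        fun m => hrevc node m
      -- m ∈ A characterization in terms of deps
      have hA : ∀ m, m ∈ A ↔ node ∈ pvDeps temp m ∧ (∀ d ∈ pvDeps temp m, d ∈ P') := by
        intro m
        rw [d3 m, i2 m, hcount m]
        have hf := hfsub m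
        have hmemiff : (∀ d ∈ pvDeps temp m, d ∈ P') ↔
            ((pvDeps temp m).filter (fun d => !P'.contains d)).length = 0 := by
          rw [List.length_eq_zero_iff, List.filter_eq_nil_iff]
          constructor
          · intro h a ha
            simp [List.contains_eq_mem, h a ha]
          · intro h a ha
            have := h a ha
            simpa [List.contains_eq_mem] using this
        have hnodemem : node ∈ pvDeps temp m ↔ 1 ≤ (pvDeps temp m).count node := by
          constructor
          · intro h
            exact Nat.one_le_iff_ne_zero.2 (fun h0 => (List.count_eq_zero.1 h0) h)
          · intro h
            by_contra hn
            rw [List.count_eq_zero.2 hn] at h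
            omega
        rw [hmemiff, hnodemem]
        constructor
        · intro ⟨h1, h2⟩
          constructor
          · omega
          · omega
        · intro ⟨h1, h2⟩
          constructor
          · omega
          · omega
      have hAK : ∀ m ∈ A, m ∈ K := by
        intro m hm
        have := (hA m).1 hm
        exact hdepK m (fun he => by rw [he] at this; exact absurd this.1 (List.not_mem_nil))
      have hAnotP' : ∀ m ∈ A, m ∉ P' := by
        intro m hm hmP'
        have hmA := (hA m).1 hm
        rcases (hmemP' m).1 hmP' with hmP | rfl
        · exact hnP (i7 m hmP node hmA.1)
        · have h0 : ((pvDeps temp m).filter (fun d => !P.contains d)).length = 0 := by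
            rw [List.length_eq_zero_iff, List.filter_eq_nil_iff]
            intro a ha
            simp [List.contains_eq_mem, hndep a ha]
          have := (hA m).1 hm
          rw [d3 m, i2 m] at hm
          omega
      -- the new invariant
      have hInv' : pvKahnInv temp K (rest ++ A)
          ((((rev.getD node []).foldl (fun st dependent =>
            if st.2.getD dependent 0 - 1 = 0
            then (st.1 ++ [dependent], st.2.insert dependent (st.2.getD dependent 0 - 1))
            else (st.1, st.2.insert dependent (st.2.getD dependent 0 - 1))) (rest, indeg))).2)
          (visited + 1) P' := by
        refine ⟨?_, ?_, ?_, ?_, ?_, ?_, ?_, ?_, ?_⟩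
        · rw [i1, hP']; push_cast; simp
        · intro m
          rw [d4 m, i2 m, hcount m]
          have := hfsub m
          push_cast
          omega
        · intro m
          constructor
          · intro hm
            rcases List.mem_append.1 hm with hm | hm
            · have hmQ := (i3 m).1 (List.mem_cons_of_mem node hm)
              have hmne : m ≠ node := by
                rintro rfl
                exact absurd hm (List.nodup_cons.1 i4).1
              refine ⟨hmQ.1, ?_, fun d hd => (hmemP' d).2 (Or.inl (hmQ.2.2 d hd))⟩
              intro hmP'
              rcases (hmemP' m).1 hmP' with h | h
              · exact hmQ.2.1 h
              · exact hmne h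
            · exact ⟨hAK m hm, hAnotP' m hm, ((hA m).1 hm).2⟩
          · rintro ⟨hmK, hmP', hmdep⟩
            have hmP : m ∉ P := fun h => hmP' ((hmemP' m).2 (Or.inl h))
            have hmne : m ≠ node := fun h => hmP' ((hmemP' m).2 (Or.inr h))
            by_cases hnd : node ∈ pvDeps temp m
            · exact List.mem_append.2 (Or.inr ((hA m).2 ⟨hnd, hmdep⟩))
            · have hsubP : ∀ d ∈ pvDeps temp m, d ∈ P := by
                intro d hd
                rcases (hmemP' d).1 (hmdep d hd) with h | rfl
                · exact h
                · exact absurd hd hnd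
              have hmQ : m ∈ node :: rest := (i3 m).2 ⟨hmK, hmP, hsubP⟩
              rcases List.mem_cons.1 hmQ with rfl | h
              · exact absurd rfl hmne
              · exact List.mem_append.2 (Or.inl h)
        · refine List.Nodup.append (List.nodup_cons.1 i4).2 d2 ?_
          intro m hmr hmA
          have hdepsP : ∀ d ∈ pvDeps temp m, d ∈ P :=
            ((i3 m).1 (List.mem_cons_of_mem node hmr)).2.2
          have hnd := (hA m).1 hmA
          exact hnP (hdepsP node hnd.1)
        · exact i5.append (List.nodup_singleton node) (List.disjoint_singleton.2 hnP)
        · intro x hx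
          rcases (hmemP' x).1 hx with h | rfl
          · exact i6 x h
          · exact hnK
        · intro m hm d hd
          apply (hmemP' d).2
          rcases (hmemP' m).1 hm with h | rfl
          · exact Or.inl (i7 m h d hd)
          · exact Or.inl (hndep d hd)
        · intro S hS x hx
          rcases (hmemP' x).1 hx with h | rfl
          · exact i8 S hS x h
          · exact hS x hnK (fun d hd => i8 S hS d (hndep d hd))
        · rw [d5, i9]
          intro x hx
          have hxc : (pvDeps temp x).count node ≠ 0 := by
            rw [← hcount x]
            exact fun h => (List.count_eq_zero.1 h) hx
          have hxd : pvDeps temp x ≠ [] := by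
            intro he
            rw [he] at hxc
            simp at hxc
          rw [i9]
          exact hdepK x hxd
      -- the fuel bound
      have hb' : (rest ++ A).length +
          pvPhi ((((rev.getD node []).foldl (fun st dependent =>
            if st.2.getD dependent 0 - 1 = 0
            then (st.1 ++ [dependent], st.2.insert dependent (st.2.getD dependent 0 - 1))
            else (st.1, st.2.insert dependent (st.2.getD dependent 0 - 1))) (rest, indeg))).2)
          < fuel := by
        obtain ⟨_, _, _, _, _, _, _, _, i9'⟩ := hInv'
        have hknd : K.Nodup := hK
        set F := fun m => ((pvDeps temp m).filter (fun d => !P.contains d)).length with hF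
        set G := fun m => (pvDeps temp m).count node with hG
        have hGF : ∀ m ∈ K, G m ≤ F m := by
          intro m _
          have := hfsub m
          simp only [hF, hG]
          omega
        have hphi_old : pvPhi indeg = (K.map F).sum := by
          unfold pvPhi
          rw [← i9, PySem.Dict.values_eq_map_keys indeg (by rw [i9]; exact hK) 0, List.map_map]
          congr 1
          apply List.map_congr_left
          intro m hm
          simp only [Function.comp]
          rw [i2 m]
          simp [hF]
        have hphi_new : pvPhi ((((rev.getD node []).foldl (fun st dependent =>
            if st.2.getD dependent 0 - 1 = 0
            then (st.1 ++ [dependent], st.2.insert dependent (st.2.getD dependent 0 - 1))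
            else (st.1, st.2.insert dependent (st.2.getD dependent 0 - 1))) (rest, indeg))).2)
            = (K.map (fun m => F m - G m)).sum := by
          unfold pvPhi
          rw [PySem.Dict.values_eq_map_keys _ (by rw [i9']; exact hK) 0, i9', List.map_map]
          congr 1
          apply List.map_congr_left
          intro m hm
          simp only [Function.comp]
          rw [d4 m, i2 m, hcount m]
          have := hfsub m
          have h2 : (((pvDeps temp m).filter (fun d => !P.contains d)).length : Int)
              - ((pvDeps temp m).count node : Int)
              = (((pvDeps temp m).filter (fun d => !P.contains d)).length
                - (pvDeps temp m).count node : Nat) := by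
            push_cast
            omega
          rw [h2]
          simp [hF, hG]
        have hsum := pv_sum_sub K F G hGF
        have hAle : A.length ≤ (K.map G).sum := by
          refine le_trans (pv_len_le_sum A G ?_) (pv_subperm_sum A K G d2 hAK)
          intro m hm
          have hmem := ((hA m).1 hm).1
          simp only [hG]
          exact Nat.one_le_iff_ne_zero.2 (fun h => (List.count_eq_zero.1 h) hmem)
        rw [hphi_new]
        rw [hphi_old] at hb
        simp only [List.length_append, List.length_cons] at hb ⊢
        omega
      -- apply the IH
      show ∃ P'', (pvKahnLoop rev (fuel+1) (node :: rest) indeg visited).1 = _ ∧ _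
      have hstep : pvKahnLoop rev (fuel+1) (node :: rest) indeg visited
          = pvKahnLoop rev fuel
            ((((rev.getD node []).foldl (fun st dependent =>
              if st.2.getD dependent 0 - 1 = 0
              then (st.1 ++ [dependent], st.2.insert dependent (st.2.getD dependent 0 - 1))
              else (st.1, st.2.insert dependent (st.2.getD dependent 0 - 1))) (rest, indeg))).1)
            ((((rev.getD node []).foldl (fun st dependent =>
              if st.2.getD dependent 0 - 1 = 0
              then (st.1 ++ [dependent], st.2.insert dependent (st.2.getD dependent 0 - 1))
              else (st.1, st.2.insert dependent (st.2.getD dependent 0 - 1))) (rest, indeg))).2)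
            (visited + 1) := rfl
      rw [hstep, d1]
      exact ih (rest ++ A) _ (visited + 1) P' hInv' hb'

theorem pv_pair_nodes_full (vals : List (List String)) : ∀ (s : List String),
    vals.foldl (fun (st : List String × PySem.Set String) deps =>
        deps.foldl (fun st d =>
          if PySem.Set.contains st.2 d then st else (st.1 ++ [d], PySem.Set.add st.2 d)) st)
      (s, s)
    = (vals.foldl (fun ns deps =>
        deps.foldl (fun ns d => if ns.contains d then ns else ns ++ [d]) ns) s,
       vals.foldl (fun ns deps =>
        deps.foldl (fun ns d => if ns.contains d then ns else ns ++ [d]) ns) s) := by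
  have inner : ∀ (deps s : List String),
      deps.foldl (fun st d =>
          if PySem.Set.contains st.2 d then st else (st.1 ++ [d], PySem.Set.add st.2 d)) (s, s)
      = (deps.foldl (fun ns d => if ns.contains d then ns else ns ++ [d]) s,
         deps.foldl (fun ns d => if ns.contains d then ns else ns ++ [d]) s) := by
    intro deps
    induction deps with
    | nil => intro s; rfl
    | cons d deps ih =>
      intro s
      simp only [List.foldl_cons]
      by_cases hc : s.contains d = true
      · have hsc : PySem.Set.contains s d = true :=
          (PySem.Set.contains_iff s d).2 (List.contains_iff_mem.1 hc)
        rw [if_pos hsc, if_pos hc]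
        exact ih s
      · have hmem : d ∉ s := fun h => hc (List.contains_iff_mem.2 h)
        have hsc : PySem.Set.contains s d = false := by
          rw [Bool.eq_false_iff]
          intro h
          exact hmem ((PySem.Set.contains_iff s d).1 h)
        rw [if_neg (by simpa using hmem), if_neg (by simpa using hmem), PySem.Set.add_of_not_mem hmem]
        exact ih (s ++ [d])
  intro s
  induction vals generalizing s with
  | nil => rfl
  | cons v vals ih =>
    simp only [List.foldl_cons]
    rw [inner v s]
    exact ih _

theorem pv_pair_nodes (vals : List (List String)) (s : List String) :
    (vals.foldl (fun (st : List String × PySem.Set String) deps =>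
        deps.foldl (fun st d =>
          if PySem.Set.contains st.2 d then st else (st.1 ++ [d], PySem.Set.add st.2 d)) st)
      (s, s)).1
    = vals.foldl (fun ns deps =>
        deps.foldl (fun ns d => if ns.contains d then ns else ns ++ [d]) ns) s := by
  rw [pv_pair_nodes_full]

theorem pv_core (temp : PySem.Dict String (List String)) (htk : temp.keys.Nodup) :
    (detect_cycles temp).isSome =
      (let nodes0 := temp.keys
       let st := temp.values.foldl
          (fun (st : List String × PySem.Set String) deps =>
            deps.foldl (fun st d =>
              if PySem.Set.contains st.2 d then st else (st.1 ++ [d], PySem.Set.add st.2 d)) st)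
          (nodes0, PySem.Set.ofList nodes0)
       let nodes := st.1
       let resolved := pvSatLoop temp nodes (nodes.length + 1) []
       decide (resolved.length ≠ nodes.length)) := by
  have hfstnd : (temp.items.map Prod.fst).Nodup := htk
  have hite : ∀ (c : Prop) [Decidable c] (l : List String),
      (if c then none else some l).isSome = decide (¬ c) := by
    intro c _ l
    by_cases h : c <;> simp [h]
  have hfiltnil : ∀ l : List String, l.filter (fun d => !(([] : List String)).contains d) = l := by
    intro l
    simp
  have hnodes : (temp.values.foldl
      (fun (st : List String × PySem.Set String) deps =>
        deps.foldl (fun st d =>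
          if PySem.Set.contains st.2 d then st else (st.1 ++ [d], PySem.Set.add st.2 d)) st)
      (temp.keys, PySem.Set.ofList temp.keys)).1
      = temp.values.foldl
        (fun ns deps => deps.foldl (fun ns d => if ns.contains d then ns else ns ++ [d]) ns)
        temp.keys := by
    rw [PySem.Set.ofList_eq_self_of_nodup temp.keys htk]
    exact pv_pair_nodes temp.values temp.keys
  simp only [detect_cycles, hnodes]
  obtain ⟨z1, z2, z3⟩ := pv_zero_fold temp.keys PySem.Dict.empty
  set ind0 : PySem.Dict String Int := temp.keys.foldl (fun d node => if d.contains node then d else d.insert node 0)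
    PySem.Dict.empty with hind0def
  obtain ⟨b1, b2, b3, b4, b5⟩ := pv_build_fold temp.items ind0 PySem.Dict.empty
  set BI := temp.items.foldl (fun st nd => nd.2.foldl (fun st dep =>
      (if st.1.contains dep then st.1 else st.1.insert dep 0,
       st.2.insert dep (st.2.getD dep [] ++ [nd.1])))
      (st.1.insert nd.1 (nd.2.length : Int), st.2)) (ind0, PySem.Dict.empty) with hBIdef
  have hKnd : BI.1.keys.Nodup := b4 (z3 PySem.Dict.nodup_keys_empty)
  have F1 : ∀ n, BI.1.getD n 0 = ((pvDeps temp n).length : Int) := by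
    intro n
    by_cases hn : temp.contains n
    · obtain ⟨v, hv⟩ : ∃ v, temp.get? n = some v := by
        rw [PySem.Dict.contains_eq_isSome_get?] at hn
        exact Option.isSome_iff_exists.1 hn
      have hmem : (n, v) ∈ temp.items := PySem.Dict.mem_items_of_get?_eq_some temp hv
      have hdep : pvDeps temp n = v := by
        unfold pvDeps
        rw [PySem.Dict.getD_eq_get?_getD, hv]
        rfl

      rw [b1 n v hmem hfstnd, hdep]
    · have hnk : n ∉ temp.items.map Prod.fst := by
        intro h
        rw [(PySem.Dict.contains_iff_mem_keys temp n).2 h] at hn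
        exact hn rfl
      rw [b2 n hnk, z1 n]
      have hd0 : pvDeps temp n = [] :=
        PySem.Dict.getD_of_not_contains temp [] (by simpa using hn)
      rw [hd0]
      simp
  have hKmem : ∀ n, n ∈ BI.1.keys ↔ (n ∈ temp.keys ∨ ∃ p ∈ temp.items, n ∈ p.2) := by
    intro n
    rw [b3 n, z2 n]
    have hkk : temp.items.map Prod.fst = temp.keys := rfl
    rw [hkk]
    simp only [PySem.Dict.keys_empty, List.not_mem_nil, false_or]
    tauto
  have hrevgd : ∀ x, BI.2.getD x []
      = (temp.items.map (fun p => List.replicate (p.2.count x) p.1)).flatten := by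
    intro x
    rw [b5 x]
    simp
  have F3 : ∀ x m, (BI.2.getD x []).count m = (pvDeps temp m).count x := by
    intro x m
    rw [hrevgd x, pv_flat_count]
    by_cases hm : temp.contains m
    · obtain ⟨v, hv⟩ : ∃ v, temp.get? m = some v := by
        rw [PySem.Dict.contains_eq_isSome_get?] at hm
        exact Option.isSome_iff_exists.1 hm
      have hmem : (m, v) ∈ temp.items := PySem.Dict.mem_items_of_get?_eq_some temp hv
      have hdep : pvDeps temp m = v := by
        unfold pvDeps
        rw [PySem.Dict.getD_eq_get?_getD, hv]
        rfl

      rw [(pv_assoc_filter temp.items m hfstnd).1 v hmem, hdep]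
      simp
    · have hnk : m ∉ temp.items.map Prod.fst := by
        intro h
        rw [(PySem.Dict.contains_iff_mem_keys temp m).2 h] at hm
        exact hm rfl
      rw [(pv_assoc_filter temp.items m hfstnd).2 hnk]
      have hd0 : pvDeps temp m = [] :=
        PySem.Dict.getD_of_not_contains temp [] (by simpa using hm)
      rw [hd0]
      simp
  have hdepK : ∀ n, pvDeps temp n ≠ [] → n ∈ BI.1.keys := by
    intro n hne
    have hc : temp.contains n = true := by
      by_contra h
      exact hne (PySem.Dict.getD_of_not_contains temp [] (by simpa using h))
    exact (hKmem n).2 (Or.inl ((PySem.Dict.contains_iff_mem_keys temp n).1 hc))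
  set Q0 := (BI.1.items.filter (fun p => p.2 == 0)).map (·.1) with hQ0def
  have hQ0mem : ∀ n, n ∈ Q0 ↔ n ∈ BI.1.keys ∧ BI.1.getD n 0 = 0 := by
    intro n
    rw [hQ0def]
    constructor
    · intro h
      obtain ⟨p, hp, rfl⟩ := List.mem_map.1 h
      have hpi := List.mem_of_mem_filter hp
      have hp0 : p.2 = 0 := by simpa using (List.of_mem_filter hp)
      refine ⟨List.mem_map.2 ⟨p, hpi, rfl⟩, ?_⟩
      rw [PySem.Dict.getD_of_mem_items BI.1 (by simpa using hpi) hKnd 0, hp0]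
    · rintro ⟨hk, h0⟩
      have hk' : n ∈ BI.1.items.map Prod.fst := hk
      obtain ⟨p, hpi, rfl⟩ := List.mem_map.1 hk'
      have hgd : BI.1.getD p.1 0 = p.2 :=
        PySem.Dict.getD_of_mem_items BI.1 (by simpa using hpi) hKnd 0
      apply List.mem_map.2
      refine ⟨p, List.mem_filter.2 ⟨hpi, by simp [hgd.symm.trans h0]⟩, rfl⟩
  have hQ0nd : Q0.Nodup := by
    rw [hQ0def]
    have hsl : List.Sublist ((BI.1.items.filter (fun p => p.2 == 0)).map (·.1))
        (BI.1.items.map (·.1)) :=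
      List.Sublist.map _ List.filter_sublist
    exact List.Nodup.sublist hsl hKnd
  have hinv0 : pvKahnInv temp BI.1.keys Q0 BI.1 0 [] := by
    refine ⟨by simp, ?_, ?_, hQ0nd, List.nodup_nil, by simp, by simp, by simp, rfl⟩
    · intro m
      rw [F1 m, hfiltnil]
    · intro n
      rw [hQ0mem n, F1 n]
      constructor
      · rintro ⟨h1, h2⟩
        refine ⟨h1, by simp, ?_⟩
        intro d hd
        have hl : (pvDeps temp n).length = 0 := by exact_mod_cast h2
        rw [List.length_eq_zero_iff] at hl
        rw [hl] at hd
        cases hd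
      · rintro ⟨h1, _, h3⟩
        refine ⟨h1, ?_⟩
        have hl : pvDeps temp n = [] := by
          cases hdn : pvDeps temp n with
          | nil => rfl
          | cons a l => exact absurd (h3 a (by rw [hdn]; simp)) (List.not_mem_nil)
        rw [hl]
        simp
  obtain ⟨P, r1, r2, hP⟩ := pv_kahn_main temp BI.1.keys BI.2 hKnd F3 hdepK
    (Q0.length + pvPhi BI.1 + 1) Q0 BI.1 0 [] hinv0 (by omega)
  obtain ⟨nmem, nnodup⟩ := pv_nodes_fold temp.values temp.keys
  set NODES := temp.values.foldl
    (fun ns deps => deps.foldl (fun ns d => if ns.contains d then ns else ns ++ [d]) ns)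
    temp.keys with hNdef
  have hNnd : NODES.Nodup := nnodup htk
  have hNK : ∀ n, n ∈ BI.1.keys ↔ n ∈ NODES := by
    intro n
    rw [hKmem n, nmem n]
    have hv : (∃ v ∈ temp.values, n ∈ v) ↔ ∃ p ∈ temp.items, n ∈ p.2 := by
      constructor
      · rintro ⟨v, hvv, hnv⟩
        obtain ⟨p, hpi, rfl⟩ := List.mem_map.1 hvv
        exact ⟨p, hpi, hnv⟩
      · rintro ⟨p, hpi, hnp⟩
        exact ⟨p.2, List.mem_map.2 ⟨p, hpi, rfl⟩, hnp⟩
    rw [hv]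
  have hsatbound : (NODES.filter (fun x => !(([] : List String)).contains x)).length
      < NODES.length + 1 := by
    rw [hfiltnil]
    omega
  obtain ⟨s1, s2, s3, s4, s5⟩ := pv_sat_main temp NODES (NODES.length + 1) [] List.nodup_nil
    (by simp) hsatbound
  have hR : pvLeastClosed temp NODES (pvSatLoop temp NODES (NODES.length + 1) []) :=
    ⟨s1, s2, s4, fun S hS => s5 S hS (by simp)⟩
  have hPlen := pvLeastClosed_length_eq temp BI.1.keys NODES P
    (pvSatLoop temp NODES (NODES.length + 1) []) hNK hP hR
  have hKlen : BI.1.keys.length = NODES.length :=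
    ((List.perm_ext_iff_of_nodup hKnd hNnd).2 hNK).length_eq
  rw [hite]
  have hsize : PySem.Dict.size (pvKahnLoop BI.2 (Q0.length + pvPhi BI.1 + 1) Q0 BI.1 0).2
      = NODES.length := by
    have h1 : PySem.Dict.size (pvKahnLoop BI.2 (Q0.length + pvPhi BI.1 + 1) Q0 BI.1 0).2
        = (pvKahnLoop BI.2 (Q0.length + pvPhi BI.1 + 1) Q0 BI.1 0).2.keys.length := by
      simp [PySem.Dict.size, PySem.Dict.keys]
    rw [h1, r2, hKlen]
  have hc : ((pvKahnLoop BI.2 (Q0.length + pvPhi BI.1 + 1) Q0 BI.1 0).1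
      = (PySem.Dict.size (pvKahnLoop BI.2 (Q0.length + pvPhi BI.1 + 1) Q0 BI.1 0).2 : Int))
      ↔ (pvSatLoop temp NODES (NODES.length + 1) []).length = NODES.length := by
    rw [r1, hsize, hPlen]
    exact Int.ofNat_inj
  exact decide_eq_decide.2 (not_congr hc)

-- ===== VERDICT (by name: the statement is the Claim_ definition above) =====
theorem check_edge_spec : Claim_equal_check_edge := by
  intro graph source target _
  show check_edge graph source target = check_edge_alt graph source target
  have h0 : (graph.foldl (fun d kv => d.insert kv.1 kv.2) PySem.Dict.empty).keys.Nodup :=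
    PySem.Dict.nodup_keys_foldl_insert_key graph (fun kv => kv.1) (fun d kv => kv.2)
      PySem.Dict.empty PySem.Dict.nodup_keys_empty
  have hstep : ∀ (d : PySem.Dict String (List String)) (k : String), d.keys.Nodup →
      (if d.contains k then d else d.insert k ([] : List String)).keys.Nodup := by
    intro d k hd
    split
    · exact hd
    · exact PySem.Dict.nodup_keys_insert _ _ _ hd
  unfold check_edge check_edge_alt
  exact pv_core _ (by
    rw [PySem.Dict.keys_modify]
    exact PySem.Dict.nodup_keys_insert _ _ _ (hstep _ target (hstep _ source h0)))
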